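-- pv_equiv track=rewrite | github.com/hernancete/adventofcode | 2024_python/src/day2/puzzle1.py | is_record_safe
-- ===== SOURCE A (Python) =====
-- MIN_GAP = 1
--
-- MAX_GAP = 3
--
-- def is_record_safe(record):
--     assert isinstance(record, list)
--     if not len(record) >= 2:
--         return False
--
--     x = record[1] - record[0]
--     sign = (x > 0) - (x < 0)
--     for i in range(0, len(record) - 1):
--         gap = record[i+1] - record[i]
--         if not (
--             ((gap > 0) - (gap < 0)) == sign and
--             (MIN_GAP <= abs(gap) <= MAX_GAP)
--         ):
--             return False
--     return True
-- ===== SOURCE B (Python) =====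
-- def is_record_safe(record):
--     assert isinstance(record, list)
--     if len(record) < 2:
--         return False
--     if sorted(record) not in (record, record[::-1]):
--         return False
--     return all(1 <= abs(b - a) <= 3 for a, b in zip(record, record[1:]))
-- ===== Notes on version B (the rewrite author's own statement) =====
-- stated objective: alternative
-- what changed: B replaces A's single sign-tracking pass by a sorting-based monotonicity test: record is safe iff sorted(record) equals the record or its reversal and every adjacent absolute gap is between 1 and 3.
import Mathlib
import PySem

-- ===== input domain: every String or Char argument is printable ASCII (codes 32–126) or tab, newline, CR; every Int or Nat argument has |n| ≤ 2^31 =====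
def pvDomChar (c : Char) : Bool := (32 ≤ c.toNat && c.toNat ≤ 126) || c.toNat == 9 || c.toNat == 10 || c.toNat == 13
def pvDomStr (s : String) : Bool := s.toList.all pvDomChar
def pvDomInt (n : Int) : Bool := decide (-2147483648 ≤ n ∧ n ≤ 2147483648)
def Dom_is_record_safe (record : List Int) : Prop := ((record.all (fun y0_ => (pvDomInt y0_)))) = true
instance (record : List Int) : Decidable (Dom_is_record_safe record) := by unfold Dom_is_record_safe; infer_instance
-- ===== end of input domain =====

-- B replaces A's sign-tracking pass over the gaps by a sorting-based monotonicity test: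
-- sorted(record) must equal the record or its reversal, and every adjacent absolute gap
-- must be between 1 and 3 (objective: alternative).

-- ===== PORT A =====
-- (x > 0) - (x < 0)
def pvSign (x : Int) : Int := (if x > 0 then (1:Int) else 0) - (if x < 0 then 1 else 0)

-- the for-loop of A, with early return on a failing gap
def pvLoopA (record : List Int) (sign : Int) : List Int → Bool
  | [] => true
  | i :: rest =>
    let gap := PySem.List.pyGetD record (i+1) 0 - PySem.List.pyGetD record i 0
    if ¬ (pvSign gap = sign ∧ 1 ≤ |gap| ∧ |gap| ≤ 3) then false
    else pvLoopA record sign rest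

def is_record_safe (record : List Int) : Bool :=
  if ¬ (PySem.List.len record ≥ 2) then false
  else
    let x := PySem.List.pyGetD record 1 0 - PySem.List.pyGetD record 0 0
    let sign := pvSign x
    pvLoopA record sign (PySem.List.pyRange 0 (PySem.List.len record - 1) 1)

-- ===== PORT B =====
def is_record_safe_alt (record : List Int) : Bool :=
  if PySem.List.len record < 2 then false
  else
    -- sorted(record) not in (record, record[::-1]): membership in the 2-tuple is two equality tests
    let s := PySem.List.sorted record (fun x => x) false
    let rev := (PySem.List.slice? record none none (-1)).getD []   -- record[::-1]; slice? is total here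
    if ¬ (s = record ∨ s = rev) then false
    else
      (record.zip (PySem.List.slice record (some 1) none)).all
        (fun p => decide (1 ≤ |p.2 - p.1|) && decide (|p.2 - p.1| ≤ 3))

-- ===== PRECONDITION & SPEC =====
def Spec_is_record_safe (record : List Int) (out : Bool) : Prop := out = is_record_safe_alt record
instance (record : List Int) (out : Bool) : Decidable (Spec_is_record_safe record out) := by unfold Spec_is_record_safe; infer_instance

-- ===== CLAIM (what is proved, stated in full; the proofs are below) =====
def Claim_equal_is_record_safe : Prop := ∀ (record : List Int), Dom_is_record_safe record → Spec_is_record_safe record (is_record_safe record)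

-- ===== LEMMAS AND PROOFS =====

def pvDiffs (record : List Int) : List Int := (record.zip (record.drop 1)).map (fun p => p.2 - p.1)

def pvAllPos (r : List Int) : Bool := (pvDiffs r).all (fun d => decide (1 ≤ d) && decide (d ≤ 3))
def pvAllNeg (r : List Int) : Bool := (pvDiffs r).all (fun d => decide (-3 ≤ d) && decide (d ≤ -1))
def pvAllAbs (r : List Int) : Bool := (pvDiffs r).all (fun d => decide (1 ≤ |d|) && decide (|d| ≤ 3))

theorem pvDiffs_cons (a b : Int) (t : List Int) :
    pvDiffs (a :: b :: t) = (b - a) :: pvDiffs (b :: t) := rfl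

-- A's early-return loop is an `all` over the index list
theorem pvLoopA_eq_all (record : List Int) (sign : Int) (l : List Int) :
    pvLoopA record sign l =
      l.all (fun i =>
        decide (pvSign (PySem.List.pyGetD record (i+1) 0 - PySem.List.pyGetD record i 0) = sign ∧
          1 ≤ |PySem.List.pyGetD record (i+1) 0 - PySem.List.pyGetD record i 0| ∧
          |PySem.List.pyGetD record (i+1) 0 - PySem.List.pyGetD record i 0| ≤ 3)) := by
  induction l with
  | nil => rfl
  | cons i rest ih =>
    rw [pvLoopA, List.all_cons, ← ih]
    by_cases h : (pvSign (PySem.List.pyGetD record (i+1) 0 - PySem.List.pyGetD record i 0) = sign ∧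
          1 ≤ |PySem.List.pyGetD record (i+1) 0 - PySem.List.pyGetD record i 0| ∧
          |PySem.List.pyGetD record (i+1) 0 - PySem.List.pyGetD record i 0| ≤ 3)
    · rw [if_neg (not_not_intro h), decide_eq_true h, Bool.true_and]
    · rw [if_pos h, decide_eq_false h, Bool.false_and]

-- indexed gaps over range(len-1) coincide with the zipped difference list
theorem pvAll_range_gaps (f : Int → Bool) :
    ∀ (record : List Int),
      (List.range (record.length - 1)).all
        (fun k => f (record.getD (k+1) 0 - record.getD k 0))
      = (pvDiffs record).all f := by
  intro record
  induction record with
  | nil => rfl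
  | cons a t ih =>
    cases t with
    | nil => rfl
    | cons b t' =>
      rw [pvDiffs_cons, List.all_cons]
      have hlen : (a :: b :: t').length - 1 = ((b :: t').length - 1) + 1 := by
        simp
      rw [hlen, List.range_succ_eq_map, List.all_cons, List.all_map]
      have hfun : ((fun k => f ((a :: b :: t').getD (k+1) 0 - (a :: b :: t').getD k 0)) ∘ Nat.succ)
          = (fun k => f ((b :: t').getD (k+1) 0 - (b :: t').getD k 0)) := by
        funext k
        simp [Function.comp]
      rw [hfun, ih]
      rfl

theorem pvSign_pos_point (s : Int) (hs : 0 < s) (d : Int) :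
    decide (pvSign d = pvSign s ∧ 1 ≤ |d| ∧ |d| ≤ 3) = (decide (1 ≤ d) && decide (d ≤ 3)) := by
  have h : (pvSign d = pvSign s ∧ 1 ≤ |d| ∧ |d| ≤ 3) ↔ (1 ≤ d ∧ d ≤ 3) := by
    unfold pvSign
    rcases abs_cases d with ⟨h1, h2⟩ | ⟨h1, h2⟩ <;> rw [h1] <;> split_ifs <;> omega
  rw [← Bool.decide_and]
  exact decide_eq_decide.mpr h

theorem pvSign_neg_point (s : Int) (hs : s < 0) (d : Int) :
    decide (pvSign d = pvSign s ∧ 1 ≤ |d| ∧ |d| ≤ 3) = (decide (-3 ≤ d) && decide (d ≤ -1)) := by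
  have h : (pvSign d = pvSign s ∧ 1 ≤ |d| ∧ |d| ≤ 3) ↔ (-3 ≤ d ∧ d ≤ -1) := by
    unfold pvSign
    rcases abs_cases d with ⟨h1, h2⟩ | ⟨h1, h2⟩ <;> rw [h1] <;> split_ifs <;> omega
  rw [← Bool.decide_and]
  exact decide_eq_decide.mpr h

theorem pvSign_zero_point (d : Int) :
    decide (pvSign d = pvSign 0 ∧ 1 ≤ |d| ∧ |d| ≤ 3) = false := by
  have h0 : pvSign (0 : Int) = 0 := by decide
  have h : (pvSign d = pvSign 0 ∧ 1 ≤ |d| ∧ |d| ≤ 3) ↔ False := by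
    rw [h0]
    unfold pvSign
    rcases abs_cases d with ⟨h1, h2⟩ | ⟨h1, h2⟩ <;> rw [h1] <;> split_ifs <;> simp <;> omega
  rw [decide_eq_decide.mpr h]
  rfl

-- the indexed `all` of A, with Int indices drawn from range, as an `all` over pvDiffs
theorem pvAll_cast_gaps (f : Int → Bool) (xs : List Int) :
    (List.range (xs.length - 1)).all
      ((fun i : Int => f (PySem.List.pyGetD xs (i+1) 0 - PySem.List.pyGetD xs i 0)) ∘
        (fun k : Nat => ((k : Nat) : Int)))
    = (pvDiffs xs).all f := by
  rw [← pvAll_range_gaps f xs]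
  apply congrArg
  funext k
  simp only [Function.comp_apply]
  rw [show ((k:Int)+1) = (((k+1 : Nat)):Int) by push_cast; ring]
  rw [PySem.List.pyGetD_natCast, PySem.List.pyGetD_natCast]

-- A on a list of length ≥ 2 is: all gaps between 1 and 3, or all gaps between -3 and -1
theorem pvA_eq_posneg (a b : Int) (t : List Int) :
    is_record_safe (a :: b :: t) = (pvAllPos (a :: b :: t) || pvAllNeg (a :: b :: t)) := by
  unfold is_record_safe pvAllPos pvAllNeg
  have hlen : ¬ (¬ (PySem.List.len (a :: b :: t) ≥ 2)) := by
    simp only [PySem.List.len_eq, List.length_cons]; omega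
  rw [if_neg hlen]
  have hx : PySem.List.pyGetD (a :: b :: t) 1 0 - PySem.List.pyGetD (a :: b :: t) 0 0 = b - a := by
    rw [show ((1:Int)) = (((1:Nat)):Int) from rfl, PySem.List.pyGetD_natCast,
      show ((0:Int)) = (((0:Nat)):Int) from rfl, PySem.List.pyGetD_natCast]
    rfl
  have hn : ((PySem.List.len (a :: b :: t) - 1) - 0).toNat = (a :: b :: t).length - 1 := by
    simp only [PySem.List.len_eq, List.length_cons]; omega
  have hrange : PySem.List.pyRange 0 (PySem.List.len (a :: b :: t) - 1) 1
      = (List.range ((a :: b :: t).length - 1)).map (fun k => ((k : Nat) : Int)) := by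
    rw [PySem.List.pyRange_one, hn]
    simp only [zero_add]
  rw [pvLoopA_eq_all, hrange, List.all_map, hx]
  rcases lt_trichotomy (b - a) 0 with hba | hba | hba
  · have hpt : (fun i : Int =>
          decide (pvSign (PySem.List.pyGetD (a :: b :: t) (i+1) 0 - PySem.List.pyGetD (a :: b :: t) i 0) = pvSign (b - a) ∧
            1 ≤ |PySem.List.pyGetD (a :: b :: t) (i+1) 0 - PySem.List.pyGetD (a :: b :: t) i 0| ∧
            |PySem.List.pyGetD (a :: b :: t) (i+1) 0 - PySem.List.pyGetD (a :: b :: t) i 0| ≤ 3))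
        = (fun i : Int =>
          ((fun d : Int => decide (-3 ≤ d) && decide (d ≤ -1))
            (PySem.List.pyGetD (a :: b :: t) (i+1) 0 - PySem.List.pyGetD (a :: b :: t) i 0))) := by
      funext i
      exact pvSign_neg_point _ hba _
    rw [hpt]
    have hall := pvAll_cast_gaps (fun d => decide (-3 ≤ d) && decide (d ≤ -1)) (a :: b :: t)
    have hposfalse : (pvDiffs (a :: b :: t)).all (fun d => decide (1 ≤ d) && decide (d ≤ 3)) = false := by
      rw [pvDiffs_cons, List.all_cons]
      rw [decide_eq_false (show ¬ (1 ≤ b - a) by omega), Bool.false_and, Bool.false_and]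
    rw [hposfalse, Bool.false_or]
    exact hall
  · have hpt : (fun i : Int =>
          decide (pvSign (PySem.List.pyGetD (a :: b :: t) (i+1) 0 - PySem.List.pyGetD (a :: b :: t) i 0) = pvSign (b - a) ∧
            1 ≤ |PySem.List.pyGetD (a :: b :: t) (i+1) 0 - PySem.List.pyGetD (a :: b :: t) i 0| ∧
            |PySem.List.pyGetD (a :: b :: t) (i+1) 0 - PySem.List.pyGetD (a :: b :: t) i 0| ≤ 3))
        = (fun _ : Int => false) := by
      funext i
      rw [hba]
      exact pvSign_zero_point _
    rw [hpt]
    have hconst : ((fun _ : Int => false) ∘ fun k : Nat => ((k : Nat) : Int)) = (fun _ : Nat => false) := rfl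
    have hlen1 : (a :: b :: t).length - 1 = ((b :: t).length - 1) + 1 := by simp
    rw [hconst, hlen1, List.range_succ_eq_map, List.all_cons, Bool.false_and]
    have h1 : (decide (1 ≤ b - a) && decide (b - a ≤ 3)) = false := by
      rw [decide_eq_false (show ¬ (1 ≤ b - a) by omega), Bool.false_and]
    have h2 : (decide (-3 ≤ b - a) && decide (b - a ≤ -1)) = false := by
      rw [decide_eq_false (show ¬ (b - a ≤ -1) by omega), Bool.and_false]
    rw [pvDiffs_cons, List.all_cons, List.all_cons, h1, h2, Bool.false_and, Bool.false_and, Bool.or_false]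
  · have hpt : (fun i : Int =>
          decide (pvSign (PySem.List.pyGetD (a :: b :: t) (i+1) 0 - PySem.List.pyGetD (a :: b :: t) i 0) = pvSign (b - a) ∧
            1 ≤ |PySem.List.pyGetD (a :: b :: t) (i+1) 0 - PySem.List.pyGetD (a :: b :: t) i 0| ∧
            |PySem.List.pyGetD (a :: b :: t) (i+1) 0 - PySem.List.pyGetD (a :: b :: t) i 0| ≤ 3))
        = (fun i : Int =>
          ((fun d : Int => decide (1 ≤ d) && decide (d ≤ 3))
            (PySem.List.pyGetD (a :: b :: t) (i+1) 0 - PySem.List.pyGetD (a :: b :: t) i 0))) := by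
      funext i
      exact pvSign_pos_point _ hba _
    rw [hpt]
    have hall := pvAll_cast_gaps (fun d => decide (1 ≤ d) && decide (d ≤ 3)) (a :: b :: t)
    have hnegfalse : (pvDiffs (a :: b :: t)).all (fun d => decide (-3 ≤ d) && decide (d ≤ -1)) = false := by
      rw [pvDiffs_cons, List.all_cons]
      rw [decide_eq_false (show ¬ (b - a ≤ -1) by omega), Bool.and_false, Bool.false_and]
    rw [hnegfalse, Bool.or_false]
    exact hall

-- strictly increasing small steps give a < pairwise order
theorem pvPairwise_lt_of_allPos : ∀ (r : List Int), pvAllPos r = true → List.Pairwise (· < ·) r := by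
  intro r
  induction r with
  | nil => intro _; exact List.Pairwise.nil
  | cons a t ih =>
    cases t with
    | nil => intro _; simp
    | cons b t' =>
      intro h
      rw [pvAllPos, pvDiffs_cons, List.all_cons, Bool.and_eq_true, Bool.and_eq_true,
        decide_eq_true_eq, decide_eq_true_eq] at h
      exact List.Pairwise.cons_cons_of_trans (by omega) (ih h.2)

theorem pvPairwise_gt_of_allNeg : ∀ (r : List Int), pvAllNeg r = true → List.Pairwise (· > ·) r := by
  intro r
  induction r with
  | nil => intro _; exact List.Pairwise.nil
  | cons a t ih =>
    cases t with
    | nil => intro _; simp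
    | cons b t' =>
      intro h
      rw [pvAllNeg, pvDiffs_cons, List.all_cons, Bool.and_eq_true, Bool.and_eq_true,
        decide_eq_true_eq, decide_eq_true_eq] at h
      exact List.Pairwise.cons_cons_of_trans (by omega) (ih h.2)

theorem pvAllPos_of_pairwise_le : ∀ (r : List Int), List.Pairwise (· ≤ ·) r → pvAllAbs r = true → pvAllPos r = true := by
  intro r
  induction r with
  | nil => intro _ _; rfl
  | cons a t ih =>
    cases t with
    | nil => intro _ _; rfl
    | cons b t' =>
      intro hc habs
      rw [List.pairwise_cons_cons_iff_of_trans] at hc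
      rw [pvAllAbs, pvDiffs_cons, List.all_cons, Bool.and_eq_true, Bool.and_eq_true,
        decide_eq_true_eq, decide_eq_true_eq] at habs
      rw [pvAllPos, pvDiffs_cons, List.all_cons, Bool.and_eq_true]
      refine ⟨?_, ih hc.2 habs.2⟩
      rcases abs_cases (b - a) with ⟨h1, _⟩ | ⟨h1, _⟩ <;>
        simp only [Bool.and_eq_true, decide_eq_true_eq] <;> omega

theorem pvAllNeg_of_pairwise_ge : ∀ (r : List Int), List.Pairwise (· ≥ ·) r → pvAllAbs r = true → pvAllNeg r = true := by
  intro r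
  induction r with
  | nil => intro _ _; rfl
  | cons a t ih =>
    cases t with
    | nil => intro _ _; rfl
    | cons b t' =>
      intro hc habs
      rw [List.pairwise_cons_cons_iff_of_trans] at hc
      rw [pvAllAbs, pvDiffs_cons, List.all_cons, Bool.and_eq_true, Bool.and_eq_true,
        decide_eq_true_eq, decide_eq_true_eq] at habs
      rw [pvAllNeg, pvDiffs_cons, List.all_cons, Bool.and_eq_true]
      refine ⟨?_, ih hc.2 habs.2⟩
      rcases abs_cases (b - a) with ⟨h1, _⟩ | ⟨h1, _⟩ <;>
        simp only [Bool.and_eq_true, decide_eq_true_eq] <;> omega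

theorem pvAllAbs_of_allPos (r : List Int) (h : pvAllPos r = true) : pvAllAbs r = true := by
  rw [pvAllPos, List.all_eq_true] at h
  rw [pvAllAbs, List.all_eq_true]
  intro d hd
  have := h d hd
  simp only [Bool.and_eq_true, decide_eq_true_eq] at this ⊢
  rcases abs_cases d with ⟨h1, _⟩ | ⟨h1, _⟩ <;> omega

theorem pvAllAbs_of_allNeg (r : List Int) (h : pvAllNeg r = true) : pvAllAbs r = true := by
  rw [pvAllNeg, List.all_eq_true] at h
  rw [pvAllAbs, List.all_eq_true]
  intro d hd
  have := h d hd
  simp only [Bool.and_eq_true, decide_eq_true_eq] at this ⊢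
  rcases abs_cases d with ⟨h1, _⟩ | ⟨h1, _⟩ <;> omega

-- sorted(record) = record  iff it is weakly increasing; used in both directions
theorem pvSorted_eq_self (r : List Int) (h : pvAllPos r = true) :
    PySem.List.sorted r (fun x => x) false = r := by
  apply PySem.List.sorted_eq_self_of_pairwise
  exact (pvPairwise_lt_of_allPos r h).imp (fun h => le_of_lt h)

theorem pvSorted_eq_reverse (r : List Int) (h : pvAllNeg r = true) :
    PySem.List.sorted r (fun x => x) false = r.reverse := by
  apply PySem.List.sorted_eq_of_perm_of_pairwise_lt
  · exact List.reverse_perm r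
  · rw [List.pairwise_reverse]
    exact pvPairwise_gt_of_allNeg r h

-- B on a list of length ≥ 2 is the same disjunction
theorem pvB_eq_posneg (a b : Int) (t : List Int) :
    is_record_safe_alt (a :: b :: t) = (pvAllPos (a :: b :: t) || pvAllNeg (a :: b :: t)) := by
  unfold is_record_safe_alt
  have hlen : ¬ (PySem.List.len (a :: b :: t) < 2) := by
    simp only [PySem.List.len_eq, List.length_cons]; omega
  rw [if_neg hlen]
  have hrev : (PySem.List.slice? (a :: b :: t) none none (-1)).getD [] = (a :: b :: t).reverse := by
    rw [PySem.List.slice?_none_none_neg_one]; rfl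
  have habs : ((a :: b :: t).zip (PySem.List.slice (a :: b :: t) (some 1) none)).all
        (fun p => decide (1 ≤ |p.2 - p.1|) && decide (|p.2 - p.1| ≤ 3))
      = pvAllAbs (a :: b :: t) := by
    rw [PySem.List.slice_from_one, pvAllAbs, pvDiffs, List.all_map, List.drop_one]
    rfl
  simp only [hrev, habs]
  set r := a :: b :: t with hr
  by_cases hp : pvAllPos r = true
  · rw [if_neg (not_not_intro (Or.inl (pvSorted_eq_self r hp))), pvAllAbs_of_allPos r hp, hp,
      Bool.true_or]
  · by_cases hn : pvAllNeg r = true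
    · rw [if_neg (not_not_intro (Or.inr (pvSorted_eq_reverse r hn))), pvAllAbs_of_allNeg r hn, hn,
        Bool.or_true]
    · rw [Bool.not_eq_true] at hp hn
      rw [hp, hn, Bool.or_false]
      by_cases habs2 : pvAllAbs r = true
      · -- magnitudes fine but mixed signs: sorted r matches neither r nor r.reverse
        rw [if_pos]
        rintro (hs | hs)
        · have hle : List.Pairwise (· ≤ ·) r := by
            have := PySem.List.sorted_pairwise (xs := r) (key := fun x => x)
            rwa [hs] at this
          rw [pvAllPos_of_pairwise_le r hle habs2] at hp
          exact Bool.true_eq_false.mp hp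
        · have hge : List.Pairwise (· ≥ ·) r := by
            have := PySem.List.sorted_pairwise (xs := r) (key := fun x => x)
            rw [hs, List.pairwise_reverse] at this
            exact this
          rw [pvAllNeg_of_pairwise_ge r hge habs2] at hn
          exact Bool.true_eq_false.mp hn
      · rw [Bool.not_eq_true] at habs2
        rw [habs2]
        split_ifs <;> rfl

-- ===== VERDICT (by name: the statement is the Claim_ definition above) =====
theorem is_record_safe_spec : Claim_equal_is_record_safe := by
  intro record _
  unfold Spec_is_record_safe
  match record with
  | [] => rfl
  | [a] => rfl
  | a :: b :: t => rw [pvA_eq_posneg, pvB_eq_posneg]
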